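-- pv_equiv track=rewrite | github.com/szarbartosz/asd-python | graph_algorithms/dfs_matrix.py | dfs_matrix
-- ===== SOURCE A (Python) =====
-- def dfs_matrix(G, s):
--     V = len(G)
--     visited = [False] * V
--     parent = [None] * V
--
--     def dfs_visit(u):
--         visited[u] = True
--         for i in range(V):
--             if G[u][i] == 1:
--                 if not visited[i]:
--                     parent[i] = u
--                     dfs_visit(i)
--
--     for i in range(V):
--         if not visited[i]:
--             dfs_visit(i)
--
--     result = []
--     for i in range(V):
--         result.append(f'vertex: {i}  parent: {parent[i]}')
--     return result
-- ===== SOURCE B (Python) =====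
-- def dfs_matrix(G, s):
--     V = len(G)
--     visited = [False] * V
--     parent = [None] * V
--
--     for r in range(V):
--         if not visited[r]:
--             visited[r] = True
--             stack = [(r, 0)]
--             while stack:
--                 u, j = stack[-1]
--                 if j < V:
--                     if G[u][j] == 1 and not visited[j]:
--                         visited[j] = True
--                         parent[j] = u
--                         stack[-1] = (u, j + 1)
--                         stack.append((j, 0))
--                     else:
--                         stack[-1] = (u, j + 1)
--                 else:
--                     stack.pop()
--
--     return [f'vertex: {i}  parent: {parent[i]}' for i in range(V)]
-- ===== Notes on version B (the rewrite author's own statement) =====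
-- stated objective: alternative
-- what changed: Replaces the recursive dfs_visit closure over mutable arrays by an iterative DFS with an explicit stack of (vertex, next-row-index) frames that emulates the call frames, resuming each row scan where it left off.
import Mathlib
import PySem

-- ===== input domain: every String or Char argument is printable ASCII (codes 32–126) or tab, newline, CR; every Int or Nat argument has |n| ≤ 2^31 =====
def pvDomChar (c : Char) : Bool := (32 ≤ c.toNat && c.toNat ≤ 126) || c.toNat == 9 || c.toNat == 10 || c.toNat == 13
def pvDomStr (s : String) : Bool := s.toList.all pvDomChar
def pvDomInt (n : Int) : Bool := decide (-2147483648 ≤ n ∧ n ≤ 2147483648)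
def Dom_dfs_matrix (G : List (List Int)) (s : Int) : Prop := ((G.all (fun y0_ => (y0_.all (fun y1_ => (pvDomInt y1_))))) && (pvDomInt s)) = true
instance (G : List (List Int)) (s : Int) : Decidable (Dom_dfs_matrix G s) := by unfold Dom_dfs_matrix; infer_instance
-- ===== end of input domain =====

-- B replaces A's recursive dfs_visit by an iterative DFS with an explicit stack of
-- (vertex, next-row-index) frames; same return value (alternative decomposition, no speed claim).


-- ===== PORT A =====
-- G[u][i] as a total lookup (inside Pre_ every access is in range, so the default is never used)
def pvAt (G : List (List Int)) (u j : Nat) : Int := (G.getD u []).getD j 0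

-- state: (visited, parent)
-- Python's recursion is unbounded; the Nat fuel argument is a totality guard only:
-- recursion depth is bounded by the number of unvisited vertices, so fuel G.length suffices.
mutual
def pvVisitA (G : List (List Int)) : Nat → Nat → (List Bool × List (Option Int)) → (List Bool × List (Option Int))
  | 0, _, st => st
  | f + 1, u, st => pvScanA G f u 0 (st.1.set u true, st.2)
  termination_by f _ _ => (f, 0, 0)
def pvScanA (G : List (List Int)) : Nat → Nat → Nat → (List Bool × List (Option Int)) → (List Bool × List (Option Int))
  | f, u, j, st =>
    if j < G.length then
      pvScanA G f u (j + 1)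
        (if pvAt G u j = 1 ∧ st.1.getD j false = false
         then pvVisitA G f j (st.1, st.2.set j (some (u : Int)))
         else st)
    else st
  termination_by f _ j _ => (f, 1, G.length - j)
end

def dfs_matrix (G : List (List Int)) (s : Int) : List String :=
  let V := G.length
  let st := (List.range V).foldl
    (fun st i => if st.1.getD i false = false then pvVisitA G V i st else st)
    (List.replicate V false, List.replicate V (none : Option Int))
  (List.range V).map (fun (i : Nat) =>
    "vertex: " ++ PySem.Int.toStr (Int.ofNat i) ++ "  parent: " ++
      (match st.2.getD i none with
       | none => "None"
       | some p => PySem.Int.toStr p))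

-- ===== PORT B =====
-- the explicit stack machine; head of the list is the top of the stack.
-- fuel is a totality guard only: each run takes at most (V+1)*(V+2) steps.
def pvRunB (G : List (List Int)) : Nat → List (Nat × Nat) → (List Bool × List (Option Int)) → (List Bool × List (Option Int))
  | 0, _, st => st
  | _ + 1, [], st => st
  | f + 1, (u, j) :: rest, st =>
    if j < G.length then
      if pvAt G u j = 1 ∧ st.1.getD j false = false then
        pvRunB G f ((j, 0) :: (u, j + 1) :: rest) (st.1.set j true, st.2.set j (some (u : Int)))
      else
        pvRunB G f ((u, j + 1) :: rest) st
    else pvRunB G f rest st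

def dfs_matrix_alt (G : List (List Int)) (s : Int) : List String :=
  let V := G.length
  let st := (List.range V).foldl
    (fun st r => if st.1.getD r false = false
                 then pvRunB G ((V + 1) * (V + 2)) [(r, 0)] (st.1.set r true, st.2)
                 else st)
    (List.replicate V false, List.replicate V (none : Option Int))
  (List.range V).map (fun (i : Nat) =>
    "vertex: " ++ PySem.Int.toStr (Int.ofNat i) ++ "  parent: " ++
      (match st.2.getD i none with
       | none => "None"
       | some p => PySem.Int.toStr p))

-- ===== PRECONDITION & SPEC =====
-- Pre_ excludes exactly the inputs where Python A raises an IndexError: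
-- every vertex's row is fully scanned, so A raises iff some row is shorter than len(G).
def Pre_dfs_matrix (G : List (List Int)) (s : Int) : Prop := ∀ row ∈ G, G.length ≤ row.length
instance (G : List (List Int)) (s : Int) : Decidable (Pre_dfs_matrix G s) := by unfold Pre_dfs_matrix; infer_instance
def pvWitness_dfs_matrix : List (List Int) × Int := ([[0, 1], [1, 0]], 0)
def Spec_dfs_matrix (G : List (List Int)) (s : Int) (out : List String) : Prop := out = dfs_matrix_alt G s
instance (G : List (List Int)) (s : Int) (out : List String) : Decidable (Spec_dfs_matrix G s out) := by unfold Spec_dfs_matrix; infer_instance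

-- ===== CLAIM (what is proved, stated in full; the proofs are below) =====
def Claim_equal_dfs_matrix : Prop := ∀ (G : List (List Int)) (s : Int), Dom_dfs_matrix G s → Pre_dfs_matrix G s → Spec_dfs_matrix G s (dfs_matrix G s)

-- ===== LEMMAS AND PROOFS =====

-- counting the still-unvisited entries; basic facts about List.set
def pvCF (l : List Bool) : Nat := l.count false

lemma pvCF_set_le (l : List Bool) (j : Nat) : pvCF (l.set j true) ≤ pvCF l := by
  induction l generalizing j with
  | nil => simp [pvCF]
  | cons a l ih =>
    cases j with
    | zero => simp [pvCF, List.count_cons]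
    | succ j =>
      simp only [List.set, pvCF, List.count_cons] at *
      have := ih j
      omega

lemma pvCF_set_eq (l : List Bool) (j : Nat) (hj : j < l.length)
    (hf : l.getD j false = false) : pvCF (l.set j true) + 1 = pvCF l := by
  induction l generalizing j with
  | nil => simp at hj
  | cons a l ih =>
    cases j with
    | zero => simp at hf; simp [pvCF, hf]
    | succ j =>
      simp only [List.length_cons] at hj
      simp only [List.getD_cons_succ] at hf
      have := ih j (by omega) hf
      simp only [List.set, pvCF, List.count_cons] at *
      omega

lemma pvCF_pos (l : List Bool) (j : Nat) (hj : j < l.length)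
    (hf : l.getD j false = false) : 1 ≤ pvCF l := by
  have := pvCF_set_eq l j hj hf
  omega

lemma pvCF_le_length (l : List Bool) : pvCF l ≤ l.length := List.count_le_length

-- the invariant: lengths preserved, unvisited count does not grow
def pvInv (a b : List Bool × List (Option Int)) : Prop :=
  a.1.length = b.1.length ∧ a.2.length = b.2.length ∧ pvCF a.1 ≤ pvCF b.1

lemma pvInv_refl (a : List Bool × List (Option Int)) : pvInv a a := ⟨rfl, rfl, le_refl _⟩

lemma pvInv_trans {a b c : List Bool × List (Option Int)} (h1 : pvInv a b) (h2 : pvInv b c) :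
    pvInv a c := ⟨h1.1.trans h2.1, h1.2.1.trans h2.2.1, h1.2.2.trans h2.2.2⟩

lemma pvScanA_inv_of (G : List (List Int)) (f : Nat)
    (hv : ∀ u st, pvInv (pvVisitA G f u st) st) :
    ∀ k u j st, G.length ≤ j + k → pvInv (pvScanA G f u j st) st := by
  intro k
  induction k with
  | zero =>
    intro u j st h
    rw [pvScanA, if_neg (by omega : ¬ j < G.length)]
    exact pvInv_refl st
  | succ k ih =>
    intro u j st h
    rw [pvScanA]
    by_cases hj : j < G.length
    · rw [if_pos hj]
      by_cases hg : pvAt G u j = 1 ∧ st.1.getD j false = false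
      · rw [if_pos hg]
        refine pvInv_trans (ih u (j+1) _ (by omega)) ?_
        refine pvInv_trans (hv j (st.1, st.2.set j (some (u : Int)))) ?_
        exact ⟨rfl, by simp, le_refl _⟩
      · rw [if_neg hg]
        exact ih u (j+1) st (by omega)
    · rw [if_neg hj]
      exact pvInv_refl st

lemma pvVisitA_inv (G : List (List Int)) :
    ∀ f u st, pvInv (pvVisitA G f u st) st := by
  intro f
  induction f with
  | zero => intro u st; rw [pvVisitA]; exact pvInv_refl st
  | succ f ih =>
    intro u st
    rw [pvVisitA]
    refine pvInv_trans (pvScanA_inv_of G f ih G.length u 0 _ (by omega)) ?_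
    exact ⟨by simp, rfl, pvCF_set_le _ _⟩

lemma pvScanA_inv (G : List (List Int)) (f u j : Nat) (st : List Bool × List (Option Int)) :
    pvInv (pvScanA G f u j st) st :=
  pvScanA_inv_of G f (pvVisitA_inv G f) G.length u j st (by omega)

lemma pvVisitA_pair_eq (G : List (List Int)) (f j : Nat) (v : List Bool) (p : List (Option Int))
    (hf : f ≠ 0) : pvVisitA G f j (v, p) = pvScanA G (f - 1) j 0 (v.set j true, p) := by
  obtain ⟨f', rfl⟩ : ∃ f', f = f' + 1 := ⟨f - 1, by omega⟩
  rw [pvVisitA]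
  rfl

-- fuel irrelevance: any fuel ≥ the number of unvisited vertices gives the same result
lemma pvScanA_stab (G : List (List Int)) :
    ∀ n f g u j st, st.1.length = G.length →
      pvCF st.1 * (G.length + 1) + (G.length - j) ≤ n →
      pvCF st.1 ≤ f → pvCF st.1 ≤ g →
      pvScanA G f u j st = pvScanA G g u j st := by
  intro n
  induction n with
  | zero =>
    intro f g u j st _ hn _ _
    have hj : ¬ j < G.length := by omega
    conv_lhs => rw [pvScanA]
    conv_rhs => rw [pvScanA]
    rw [if_neg hj, if_neg hj]
  | succ n ih =>
    intro f g u j st hl hn hf hg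
    by_cases hj : j < G.length
    · conv_lhs => rw [pvScanA]
      conv_rhs => rw [pvScanA]
      rw [if_pos hj, if_pos hj]
      by_cases hgd : pvAt G u j = 1 ∧ st.1.getD j false = false
      · rw [if_pos hgd, if_pos hgd]
        have hcf1 : 1 ≤ pvCF st.1 := pvCF_pos st.1 j (by omega) hgd.2
        have hce : pvCF (st.1.set j true) + 1 = pvCF st.1 := pvCF_set_eq st.1 j (by omega) hgd.2
        rw [pvVisitA_pair_eq G f j st.1 (st.2.set j (some (u : Int))) (by omega),
            pvVisitA_pair_eq G g j st.1 (st.2.set j (some (u : Int))) (by omega)]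
        have hmul : pvCF (st.1.set j true) * (G.length + 1) + (G.length + 1)
            = pvCF st.1 * (G.length + 1) := by
          rw [← hce]; ring
        have hX : ∀ h, pvCF (st.1.set j true) ≤ h →
            pvScanA G h j 0 (st.1.set j true, st.2.set j (some (u : Int)))
            = pvScanA G (pvCF (st.1.set j true)) j 0 (st.1.set j true, st.2.set j (some (u : Int))) := by
          intro h hh
          refine ih h _ j 0 _ (by simpa using hl) ?_ hh (le_refl _)
          show pvCF (st.1.set j true) * (G.length + 1) + (G.length - 0) ≤ n
          omega
        rw [hX (f - 1) (by omega), hX (g - 1) (by omega)]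
        set X := pvScanA G (pvCF (st.1.set j true)) j 0 (st.1.set j true, st.2.set j (some (u : Int))) with hXdef
        have hinv := pvScanA_inv G (pvCF (st.1.set j true)) j 0 (st.1.set j true, st.2.set j (some (u : Int)))
        rw [← hXdef] at hinv
        have hXl : X.1.length = G.length := by
          have h1 := hinv.1
          simp only [List.length_set] at h1
          omega
        have hXc : pvCF X.1 ≤ pvCF (st.1.set j true) := hinv.2.2
        have hk : pvCF X.1 * (G.length + 1) ≤ pvCF (st.1.set j true) * (G.length + 1) :=
          Nat.mul_le_mul_right _ hXc
        exact ih f g u (j + 1) X hXl (by omega) (by omega) (by omega)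
      · rw [if_neg hgd, if_neg hgd]
        exact ih f g u (j + 1) st hl (by omega) hf hg
    · conv_lhs => rw [pvScanA]
      conv_rhs => rw [pvScanA]
      rw [if_neg hj, if_neg hj]

-- the stack machine's denotation: finish every frame by the scan fuelled at exactly the unvisited count
def pvFinish (G : List (List Int)) : List (Nat × Nat) → (List Bool × List (Option Int)) → (List Bool × List (Option Int))
  | [], st => st
  | (u, j) :: rest, st => pvFinish G rest (pvScanA G (pvCF st.1) u j st)

def pvNeed (G : List (List Int)) (stack : List (Nat × Nat)) (st : List Bool × List (Option Int)) : Nat :=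
  (stack.map (fun p => G.length + 2 - p.2)).sum + (G.length + 2) * pvCF st.1

lemma pvRunB_main (G : List (List Int)) :
    ∀ f stack st, st.1.length = G.length → (∀ p ∈ stack, p.2 ≤ G.length) →
      pvNeed G stack st ≤ f → pvRunB G f stack st = pvFinish G stack st := by
  intro f
  induction f with
  | zero =>
    intro stack st _ hfr hn
    cases stack with
    | nil => rw [pvRunB, pvFinish]
    | cons p rest =>
      exfalso
      have hp : p.2 ≤ G.length := hfr p List.mem_cons_self
      simp only [pvNeed, List.map_cons, List.sum_cons] at hn
      omega
  | succ f ih =>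
    intro stack st hl hfr hn
    cases stack with
    | nil => rw [pvRunB, pvFinish]
    | cons p rest =>
      obtain ⟨u, j⟩ := p
      have hjV : j ≤ G.length := hfr (u, j) List.mem_cons_self
      have hrest : ∀ p ∈ rest, p.2 ≤ G.length := fun p hp => hfr p (List.mem_cons_of_mem _ hp)
      rw [pvRunB, pvFinish]
      by_cases hj : j < G.length
      · rw [if_pos hj]
        by_cases hgd : pvAt G u j = 1 ∧ st.1.getD j false = false
        · rw [if_pos hgd]
          have hcf1 : 1 ≤ pvCF st.1 := pvCF_pos st.1 j (by omega) hgd.2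
          have hce : pvCF (st.1.set j true) + 1 = pvCF st.1 := pvCF_set_eq st.1 j (by omega) hgd.2
          have hproj : pvCF (st.1.set j true, st.2.set j (some (u : Int))).1
              = pvCF (st.1.set j true) := rfl
          have hmul2 : (G.length + 2) * pvCF (st.1.set j true) + (G.length + 2)
              = (G.length + 2) * pvCF st.1 := by
            rw [← hce]; ring
          -- unfold the spec-side scan one step
          conv_rhs => rw [pvScanA]
          rw [if_pos hj, if_pos hgd]
          rw [pvVisitA_pair_eq G (pvCF st.1) j st.1 (st.2.set j (some (u : Int))) (by omega)]
          -- the machine side via ih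
          rw [ih ((j, 0) :: (u, j + 1) :: rest) (st.1.set j true, st.2.set j (some (u : Int)))
                (by simpa using hl)
                (by intro p hp
                    simp only [List.mem_cons] at hp
                    rcases hp with rfl | rfl | hp
                    · exact Nat.zero_le _
                    · omega
                    · exact hrest p hp)
                (by simp only [pvNeed, List.map_cons, List.sum_cons] at hn ⊢
                    omega)]
          rw [pvFinish, pvFinish]
          have hc1 : pvCF (st.1.set j true, st.2.set j (some (u : Int))).1 = pvCF st.1 - 1 := by
            rw [hproj]; omega
          rw [hc1]
          set X := pvScanA G (pvCF st.1 - 1) j 0 (st.1.set j true, st.2.set j (some (u : Int))) with hXdef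
          have hinv := pvScanA_inv G (pvCF st.1 - 1) j 0 (st.1.set j true, st.2.set j (some (u : Int)))
          rw [← hXdef] at hinv
          have hXl : X.1.length = G.length := by
            have h1 := hinv.1
            simp only [List.length_set] at h1
            omega
          have hXc : pvCF X.1 ≤ pvCF (st.1.set j true) := by
            have h2 := hinv.2.2
            rw [hproj] at h2
            exact h2
          congr 1
          exact pvScanA_stab G (pvCF X.1 * (G.length + 1) + (G.length - (j + 1)))
            (pvCF X.1) (pvCF st.1) u (j + 1) X hXl (le_refl _) (le_refl _) (by omega)
        · rw [if_neg hgd]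
          rw [ih ((u, j + 1) :: rest) st hl
                (by intro p hp
                    simp only [List.mem_cons] at hp
                    rcases hp with rfl | hp
                    · omega
                    · exact hrest p hp)
                (by simp only [pvNeed, List.map_cons, List.sum_cons] at hn ⊢
                    omega)]
          rw [pvFinish]
          congr 1
          conv_rhs => rw [pvScanA]
          rw [if_pos hj, if_neg hgd]
      · rw [if_neg hj]
        rw [ih rest st hl hrest
              (by simp only [pvNeed, List.map_cons, List.sum_cons] at hn ⊢
                  omega)]
        congr 1
        conv_rhs => rw [pvScanA]
        rw [if_neg hj]

-- one iteration of the outer loop: recursive visit = one run of the stack machine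
lemma pvBody_eq (G : List (List Int)) (st : List Bool × List (Option Int)) (i : Nat)
    (hi : i < G.length) (hl : st.1.length = G.length) :
    (if st.1.getD i false = false then pvVisitA G G.length i st else st)
    = (if st.1.getD i false = false
       then pvRunB G ((G.length + 1) * (G.length + 2)) [(i, 0)] (st.1.set i true, st.2) else st) := by
  by_cases h : st.1.getD i false = false
  · rw [if_pos h, if_pos h]
    have hcf1 : 1 ≤ pvCF st.1 := pvCF_pos st.1 i (by omega) h
    have hcfV : pvCF st.1 ≤ G.length := by
      have := pvCF_le_length st.1
      omega
    have hce : pvCF (st.1.set i true) + 1 = pvCF st.1 := pvCF_set_eq st.1 i (by omega) h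
    have hproj : pvCF (st.1.set i true, st.2).1 = pvCF (st.1.set i true) := rfl
    have hb1 : (G.length + 2) * pvCF (st.1.set i true) + (G.length + 2)
        ≤ (G.length + 2) * G.length := by
      rw [← Nat.mul_succ]
      exact Nat.mul_le_mul_left _ (by omega)
    have hb2 : (G.length + 2) * G.length ≤ (G.length + 1) * (G.length + 2) := by
      rw [Nat.mul_comm (G.length + 1)]
      exact Nat.mul_le_mul_left _ (by omega)
    rw [show pvVisitA G G.length i st = pvVisitA G G.length i (st.1, st.2) by rfl,
        pvVisitA_pair_eq G G.length i st.1 st.2 (by omega)]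
    rw [pvRunB_main G ((G.length + 1) * (G.length + 2)) [(i, 0)] (st.1.set i true, st.2)
          (by simpa using hl)
          (by intro p hp
              simp only [List.mem_cons, List.not_mem_nil, or_false] at hp
              subst hp
              exact Nat.zero_le _)
          (by simp only [pvNeed, List.map_cons, List.map_nil, List.sum_cons, List.sum_nil]
              omega)]
    rw [pvFinish, pvFinish, hproj]
    exact pvScanA_stab G (pvCF (st.1.set i true) * (G.length + 1) + G.length)
      (G.length - 1) (pvCF (st.1.set i true)) i 0 (st.1.set i true, st.2)
      (by simpa using hl)
      (by show pvCF (st.1.set i true) * (G.length + 1) + (G.length - 0) ≤ _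
          omega)
      (by show pvCF (st.1.set i true) ≤ G.length - 1
          omega)
      (le_refl _)
  · rw [if_neg h, if_neg h]

lemma pvFold_eq (G : List (List Int)) :
    ∀ (l : List Nat) (st : List Bool × List (Option Int)), st.1.length = G.length → (∀ i ∈ l, i < G.length) →
      l.foldl (fun st i => if st.1.getD i false = false then pvVisitA G G.length i st else st) st
      = l.foldl (fun st r => if st.1.getD r false = false
                 then pvRunB G ((G.length + 1) * (G.length + 2)) [(r, 0)] (st.1.set r true, st.2)
                 else st) st := by
  intro l
  induction l with
  | nil => intro st _ _; rfl
  | cons i l ih =>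
    intro st hl hmem
    have hi : i < G.length := hmem i List.mem_cons_self
    rw [List.foldl_cons, List.foldl_cons, ← pvBody_eq G st i hi hl]
    apply ih
    · by_cases h : st.1.getD i false = false
      · rw [if_pos h]
        have := (pvVisitA_inv G G.length i st).1
        omega
      · rw [if_neg h]
        exact hl
    · exact fun r hr => hmem r (List.mem_cons_of_mem _ hr)

-- ===== VERDICT (by name: the statement is the Claim_ definition above) =====
theorem dfs_matrix_spec : Claim_equal_dfs_matrix := by
  unfold Claim_equal_dfs_matrix
  intro G s _ _
  unfold Spec_dfs_matrix dfs_matrix dfs_matrix_alt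
  simp only
  rw [pvFold_eq G (List.range G.length)
        (List.replicate G.length false, List.replicate G.length (none : Option Int))
        (by simp) (by intro i hi; exact List.mem_range.mp hi)]
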